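-- pv_equiv track=rewrite | github.com/wasjabloch/relMT | src/relmt/utils.py | _fftw_sizes
-- ===== SOURCE A (Python) =====
-- def _fftw_sizes(na: int, nb: int, nc: int, nd: int) -> list[int]:
--     """
--     Return a sorted list of sample sized for which FFTW is optimized
--
--     This is an integer of the form:
--
--     2**a * 3**b * 5**c * 7**d * 11**e * 13**f
--
--     a, b, c, and d are arbitrary  and e+f is either 0 or 1.
--
--     Parameters
--     ----------
--     na, nb, nc, nc, nd: (int)
--         Insert values in range(n) in the equation
--
--     Returns
--     -------
--     ns: list[int]
--         Sorted list of integers that obeys the equation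
--     """
--     # TODO: implement this as parameter-less generator:
--     # a, b, c, d, e, f = (0, 0, 0, 0, 0, 0)
--     # a, b, c, d, e, f = (1, 0, 0, 0, 0, 0)
--     # a, b, c, d, e, f = (0, 1, 0, 0, 0, 0)
--     # a, b, c, d, e, f = (2, 0, 0, 0, 0, 0)
--     # a, b, c, d, e, f = (0, 0, 1, 0, 0, 0)
--     # a, b, c, d, e, f = (1, 1, 0, 0, 0, 0)
--     # a, b, c, d, e, f = (0, 0, 0, 1, 0, 0)
--     # a, b, c, d, e, f = (3, 0, 0, 0, 0, 0)
--     # a, b, c, d, e, f = (0, 2, 0, 0, 0, 0)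
--     # a, b, c, d, e, f = (1, 0, 1, 0, 0, 0)
--     # a, b, c, d, e, f = (0, 0, 0, 0, 1, 0)
--     # yield 2**a * 3**b * 5**c * 7**d * 11**e * 13**f
--
--     ns = [
--         2**a * 3**b * 5**c * 7**d * 11**e * 13**f
--         for a in range(na)
--         for b in range(nb)
--         for c in range(nc)
--         for d in range(nd)
--         for e in range(2)
--         for f in range(2)
--         if e + f <= 1
--     ]
--     return sorted(ns)
-- ===== SOURCE B (Python) =====
-- def _merge(xs, ys):
--     """Standard two-pointer merge of two ascending lists."""
--     i = j = 0
--     out = []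
--     while i < len(xs) and j < len(ys):
--         if xs[i] <= ys[j]:
--             out.append(xs[i])
--             i += 1
--         else:
--             out.append(ys[j])
--             j += 1
--     out.extend(xs[i:])
--     out.extend(ys[j:])
--     return out
--
-- def _merge_all(runs):
--     """Tournament-merge a list of ascending runs into one ascending list."""
--     while len(runs) > 1:
--         runs = [_merge(runs[i], runs[i + 1]) if i + 1 < len(runs) else runs[i]
--                 for i in range(0, len(runs), 2)]
--     return runs[0] if runs else []
--
-- def _fftw_sizes(na: int, nb: int, nc: int, nd: int) -> list[int]:
--     """Produce the sizes already sorted by merging ascending runs; no sort call."""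
--     if na <= 0 or nb <= 0 or nc <= 0 or nd <= 0:
--         return []
--     acc = [1]
--     for p, n in ((2, na), (3, nb), (5, nc), (7, nd)):
--         acc = _merge_all([[x * p**k for k in range(n)] for x in acc])
--     return _merge_all([[x, 11 * x, 13 * x] for x in acc])
-- ===== Notes on version B (the rewrite author's own statement) =====
-- stated objective: alternative
-- what changed: Instead of enumerating all products with a flat six-level filtered comprehension and then calling sort, B builds the result already in ascending order by tournament-merging ascending runs with a hand-written two-pointer merge (each element's prime-power run per prime, then its {x,11x,13x} triple), so no sort is performed at all.
import Mathlib
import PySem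

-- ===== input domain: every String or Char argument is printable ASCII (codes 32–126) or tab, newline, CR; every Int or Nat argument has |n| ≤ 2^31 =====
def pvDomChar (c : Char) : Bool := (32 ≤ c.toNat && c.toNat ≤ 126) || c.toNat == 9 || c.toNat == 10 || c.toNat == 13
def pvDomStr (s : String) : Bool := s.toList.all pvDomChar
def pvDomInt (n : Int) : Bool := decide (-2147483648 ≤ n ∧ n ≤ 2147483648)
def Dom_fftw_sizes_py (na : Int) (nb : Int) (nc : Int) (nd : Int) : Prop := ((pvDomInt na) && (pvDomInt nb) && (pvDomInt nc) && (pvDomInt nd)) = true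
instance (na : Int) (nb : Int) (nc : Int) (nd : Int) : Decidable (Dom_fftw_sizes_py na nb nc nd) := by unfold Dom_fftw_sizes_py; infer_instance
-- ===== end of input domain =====

-- B produces the list already in ascending order by two-pointer merging of ascending runs
-- (no sort call), where A enumerates a flat six-level filtered comprehension and sorts it.

-- ===== PORT A =====
def fftw_sizes_py (na : Int) (nb : Int) (nc : Int) (nd : Int) : List Int :=
  let ns :=
    (PySem.List.pyRange 0 na 1).flatMap (fun a =>
    (PySem.List.pyRange 0 nb 1).flatMap (fun b =>
    (PySem.List.pyRange 0 nc 1).flatMap (fun c =>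
    (PySem.List.pyRange 0 nd 1).flatMap (fun d =>
    (PySem.List.pyRange 0 2 1).flatMap (fun e =>
    (PySem.List.pyRange 0 2 1).filterMap (fun f =>
      if e + f ≤ 1 then
        some (2 ^ a.toNat * 3 ^ b.toNat * 5 ^ c.toNat * 7 ^ d.toNat * 11 ^ e.toNat * 13 ^ f.toNat)
      else none))))))
  PySem.List.sorted ns (fun x => x) false

-- ===== PORT B =====
-- two-pointer merge of two ascending lists (Source B's _merge, as the obvious structural recursion)
def pvMerge : List Int → List Int → List Int
  | [], ys => ys
  | x :: xs, [] => x :: xs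
  | x :: xs, y :: ys =>
    if x ≤ y then x :: pvMerge xs (y :: ys) else y :: pvMerge (x :: xs) ys
termination_by xs ys => xs.length + ys.length

-- one pairing pass of Source B's tournament merge (the body of _merge_all's while loop)
def pvPairUp : List (List Int) → List (List Int)
  | [] => []
  | [r] => [r]
  | r1 :: r2 :: rs => pvMerge r1 r2 :: pvPairUp rs

-- needed for pvMergeAll's termination
theorem pvPairUp_length (rs : List (List Int)) :
    (pvPairUp rs).length = (rs.length + 1) / 2 := by
  fun_induction pvPairUp with
  | case1 => rfl
  | case2 r => simp
  | case3 r1 r2 rs ih => simp [ih]; omega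

-- Source B's _merge_all: pair up runs until one remains
def pvMergeAll : List (List Int) → List Int
  | [] => []
  | [r] => r
  | r1 :: r2 :: rs => pvMergeAll (pvPairUp (r1 :: r2 :: rs))
termination_by rs => rs.length
decreasing_by simp [pvPairUp, pvPairUp_length]; omega

def fftw_sizes_py_alt (na : Int) (nb : Int) (nc : Int) (nd : Int) : List Int :=
  if na ≤ 0 ∨ nb ≤ 0 ∨ nc ≤ 0 ∨ nd ≤ 0 then [] else
  let acc := [((2:Int), na), (3, nb), (5, nc), (7, nd)].foldl
    (fun acc pn => pvMergeAll (acc.map (fun x =>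
      (PySem.List.pyRange 0 pn.2 1).map (fun k => x * pn.1 ^ k.toNat)))) [1]
  pvMergeAll (acc.map (fun x => [x, 11 * x, 13 * x]))

-- ===== PRECONDITION & SPEC =====
def Spec_fftw_sizes_py (na : Int) (nb : Int) (nc : Int) (nd : Int) (out : List Int) : Prop := out = fftw_sizes_py_alt na nb nc nd
instance (na : Int) (nb : Int) (nc : Int) (nd : Int) (out : List Int) : Decidable (Spec_fftw_sizes_py na nb nc nd out) := by unfold Spec_fftw_sizes_py; infer_instance

-- ===== CLAIM (what is proved, stated in full; the proofs are below) =====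
def Claim_equal_fftw_sizes_py : Prop := ∀ (na : Int) (nb : Int) (nc : Int) (nd : Int), Dom_fftw_sizes_py na nb nc nd → Spec_fftw_sizes_py na nb nc nd (fftw_sizes_py na nb nc nd)

-- ===== LEMMAS AND PROOFS =====

-- the per-element ascending run B merges in for one prime
def pvPows (x p n : Int) : List Int :=
  (PySem.List.pyRange 0 n 1).map (fun k => x * p ^ k.toNat)

-- one prime stage of B's accumulator growth
def pvStage (acc : List Int) (p n : Int) : List Int :=
  pvMergeAll (acc.map (fun x => pvPows x p n))

theorem pvMerge_perm (xs ys : List Int) : (pvMerge xs ys).Perm (xs ++ ys) := by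
  fun_induction pvMerge with
  | case1 ys => simp
  | case2 x xs => simp
  | case3 x xs y ys h ih => simpa using ih.cons x
  | case4 x xs y ys h ih =>
      exact ((ih.cons y).trans List.perm_middle.symm)

theorem pvMerge_pairwise {xs ys : List Int}
    (hx : xs.Pairwise (· ≤ ·)) (hy : ys.Pairwise (· ≤ ·)) :
    (pvMerge xs ys).Pairwise (· ≤ ·) := by
  fun_induction pvMerge with
  | case1 ys => exact hy
  | case2 x xs => exact hx
  | case3 x xs y ys h ih =>
      rw [List.pairwise_cons] at hx
      refine List.pairwise_cons.2 ⟨?_, ih hx.2 hy⟩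
      intro z hz
      rw [(pvMerge_perm _ _).mem_iff, List.mem_append] at hz
      rcases hz with hz | hz
      · exact hx.1 z hz
      · rcases List.mem_cons.1 hz with rfl | hz
        · exact h
        · exact le_trans h ((List.pairwise_cons.1 hy).1 z hz)
  | case4 x xs y ys h ih =>
      rw [List.pairwise_cons] at hy
      refine List.pairwise_cons.2 ⟨?_, ih hx hy.2⟩
      intro z hz
      rw [(pvMerge_perm _ _).mem_iff, List.mem_append] at hz
      rcases hz with hz | hz
      · rcases List.mem_cons.1 hz with rfl | hz
        · omega
        · exact le_trans (by omega) ((List.pairwise_cons.1 hx).1 z hz)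
      · exact hy.1 z hz

theorem pvPairUp_flatten_perm (rs : List (List Int)) :
    ((pvPairUp rs).flatten).Perm rs.flatten := by
  fun_induction pvPairUp with
  | case1 => rfl
  | case2 r => rfl
  | case3 r1 r2 rs ih =>
      simp only [List.flatten_cons]
      exact (((pvMerge_perm r1 r2).append ih).trans (by simp [List.append_assoc]))

theorem pvPairUp_pairwise {rs : List (List Int)} (h : ∀ r ∈ rs, r.Pairwise (· ≤ ·)) :
    ∀ r ∈ pvPairUp rs, r.Pairwise (· ≤ ·) := by
  fun_induction pvPairUp with
  | case1 => exact h
  | case2 r => exact h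
  | case3 r1 r2 rs ih =>
      intro r hr
      rcases List.mem_cons.1 hr with rfl | hr
      · exact pvMerge_pairwise (h r1 (by simp)) (h r2 (by simp))
      · exact ih (fun r hr => h r (by simp [hr])) r hr

theorem pvMergeAll_perm (rs : List (List Int)) : (pvMergeAll rs).Perm rs.flatten := by
  fun_induction pvMergeAll with
  | case1 => rfl
  | case2 r => simp
  | case3 r1 r2 rs ih => exact ih.trans (pvPairUp_flatten_perm _)

theorem pvMergeAll_pairwise {rs : List (List Int)} (h : ∀ r ∈ rs, r.Pairwise (· ≤ ·)) :
    (pvMergeAll rs).Pairwise (· ≤ ·) := by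
  fun_induction pvMergeAll with
  | case1 => simp
  | case2 r => exact h r (by simp)
  | case3 r1 r2 rs ih => exact ih (pvPairUp_pairwise h)

theorem pvStage_perm (acc : List Int) (p n : Int) :
    (pvStage acc p n).Perm (acc.flatMap (fun x => pvPows x p n)) := by
  simpa [List.flatMap_def] using pvMergeAll_perm (acc.map (fun x => pvPows x p n))

theorem pvStage_pos {acc : List Int} {p n : Int} (hp : 1 ≤ p)
    (hacc : ∀ x ∈ acc, 1 ≤ x) : ∀ y ∈ pvStage acc p n, 1 ≤ y := by
  intro y hy
  rw [(pvStage_perm acc p n).mem_iff, List.mem_flatMap] at hy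
  obtain ⟨x, hx, hy⟩ := hy
  rw [pvPows, List.mem_map] at hy
  obtain ⟨k, _, rfl⟩ := hy
  exact one_le_mul_of_one_le_of_one_le (hacc x hx) (one_le_pow₀ hp)

-- flatMap over a stage result reshapes into a nested flatMap (up to permutation)
theorem pvStage_flatMap_perm (acc : List Int) (p n : Int) (g : Int → List Int) :
    ((pvStage acc p n).flatMap g).Perm
      (acc.flatMap (fun x => (pvPows x p n).flatMap g)) := by
  exact (List.Perm.flatMap_right g (pvStage_perm acc p n)).trans (by rw [List.flatMap_assoc])

-- B's innermost triple is A's innermost e/f double loop, reordered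
theorem pvInner_perm (v : Int) :
    ([v, 11 * v, 13 * v] : List Int).Perm
      ((PySem.List.pyRange 0 2 1).flatMap (fun e =>
       (PySem.List.pyRange 0 2 1).filterMap (fun f =>
        if e + f ≤ 1 then some (v * 11 ^ e.toNat * 13 ^ f.toNat) else none))) := by
  have h2 : PySem.List.pyRange 0 2 1 = [0, 1] := by decide
  rw [h2]
  simp only [List.flatMap_cons, List.filterMap_cons, List.flatMap_nil, List.filterMap_nil]
  norm_num [mul_comm]
  exact .swap _ _ _

theorem pvRange_nil {n : Int} (h : n ≤ 0) : PySem.List.pyRange 0 n 1 = [] := by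
  simp [PySem.List.pyRange]; omega

-- A's candidate list, named for the proof
def pvCand (na nb nc nd : Int) : List Int :=
  (PySem.List.pyRange 0 na 1).flatMap (fun a =>
  (PySem.List.pyRange 0 nb 1).flatMap (fun b =>
  (PySem.List.pyRange 0 nc 1).flatMap (fun c =>
  (PySem.List.pyRange 0 nd 1).flatMap (fun d =>
  (PySem.List.pyRange 0 2 1).flatMap (fun e =>
  (PySem.List.pyRange 0 2 1).filterMap (fun f =>
    if e + f ≤ 1 then
      some (2 ^ a.toNat * 3 ^ b.toNat * 5 ^ c.toNat * 7 ^ d.toNat * 11 ^ e.toNat * 13 ^ f.toNat)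
    else none))))))

-- ===== VERDICT (by name: the statement is the Claim_ definition above) =====
theorem fftw_sizes_py_spec : Claim_equal_fftw_sizes_py := by
  intro na nb nc nd _
  show fftw_sizes_py na nb nc nd = fftw_sizes_py_alt na nb nc nd
  have hA : fftw_sizes_py na nb nc nd
      = PySem.List.sorted (pvCand na nb nc nd) (fun x => x) false := rfl
  by_cases hg : na ≤ 0 ∨ nb ≤ 0 ∨ nc ≤ 0 ∨ nd ≤ 0
  · -- some range is empty: both sides are []
    have hB0 : fftw_sizes_py_alt na nb nc nd = [] := by
      simp [fftw_sizes_py_alt, hg]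
    rw [hA, hB0, PySem.List.sorted_eq_nil_iff]
    rcases hg with h | h | h | h <;>
      simp [pvCand, pvRange_nil h, List.flatMap_eq_nil_iff]
  · have hB : fftw_sizes_py_alt na nb nc nd
        = pvMergeAll ((pvStage (pvStage (pvStage (pvStage [1] 2 na) 3 nb) 5 nc) 7 nd).map
            (fun x => [x, 11 * x, 13 * x])) := by
      unfold fftw_sizes_py_alt
      rw [if_neg hg]
      rfl
    rw [hA, hB]
    set A1 := pvStage [1] 2 na with hA1
    set A2 := pvStage A1 3 nb with hA2
    set A3 := pvStage A2 5 nc with hA3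
    set A4 := pvStage A3 7 nd with hA4
    -- positivity down the stages
    have p1 : ∀ x ∈ A1, (1:Int) ≤ x := pvStage_pos (by norm_num) (by simp)
    have p2 : ∀ x ∈ A2, (1:Int) ≤ x := pvStage_pos (by norm_num) p1
    have p3 : ∀ x ∈ A3, (1:Int) ≤ x := pvStage_pos (by norm_num) p2
    have p4 : ∀ x ∈ A4, (1:Int) ≤ x := pvStage_pos (by norm_num) p3
    -- B's output is an ascending rearrangement of A's candidate list, hence IS its sort
    apply PySem.List.sorted_id_eq_of_perm_of_pairwise
    · -- permutation: peel B's merges back into A's nested enumeration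
      refine (pvMergeAll_perm _).trans ?_
      rw [← List.flatMap_def, hA4]
      refine (pvStage_flatMap_perm A3 7 nd _).trans ?_
      rw [hA3]
      refine (pvStage_flatMap_perm A2 5 nc _).trans ?_
      rw [hA2]
      refine (pvStage_flatMap_perm A1 3 nb _).trans ?_
      rw [hA1]
      refine (pvStage_flatMap_perm [1] 2 na _).trans ?_
      simp only [pvCand, pvPows, List.flatMap_map, List.flatMap_cons, List.flatMap_nil,
        List.append_nil, one_mul]
      apply List.Perm.flatMap_left; intro a _
      apply List.Perm.flatMap_left; intro b _
      apply List.Perm.flatMap_left; intro c _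
      apply List.Perm.flatMap_left; intro d _
      exact pvInner_perm (2 ^ a.toNat * 3 ^ b.toNat * 5 ^ c.toNat * 7 ^ d.toNat)
    · -- pairwise ≤: every triple [x, 11x, 13x] is ascending since 1 ≤ x
      refine pvMergeAll_pairwise (fun r hr => ?_)
      obtain ⟨x, hx, rfl⟩ := List.mem_map.1 hr
      have h1 := p4 x hx
      refine List.pairwise_cons.2 ⟨?_, List.pairwise_cons.2 ⟨?_, List.pairwise_singleton _ _⟩⟩
      · intro z hz
        rcases List.mem_cons.1 hz with rfl | hz
        · nlinarith
        · rcases List.mem_singleton.1 hz with rfl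
          nlinarith
      · intro z hz
        rcases List.mem_singleton.1 hz with rfl
        nlinarith
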